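-- pv_equiv track=rewrite | github.com/spacegraphcats/spacegraphcats | search/frontier_search.py | find_shadow
-- ===== SOURCE A (Python) =====
-- from typing import Dict, List, Set, Union, Tuple
--
-- def find_shadow(nodes: List[int], dag: Dict[int, List[int]]) -> Set[int]:
--     shadow = set()  # type: Set[int]
--
--     seen_nodes = set()  # type: Set[int]
--
--     def add_to_shadow(node_id: int):
--         if node_id in seen_nodes:
--             return
--         seen_nodes.add(node_id)
--
--         children_ids = dag[node_id]
--
--         if len(children_ids) == 0:
--             shadow.add(node_id)
--         else:
--             for child in children_ids:
--                 add_to_shadow(child)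
--
--     for node in nodes:
--         add_to_shadow(node)
--
--     return shadow
-- ===== SOURCE B (Python) =====
-- from typing import Dict, List, Set
--
-- def find_shadow(nodes: List[int], dag: Dict[int, List[int]]) -> Set[int]:
--     shadow = set()  # type: Set[int]
--     seen_nodes = set()  # type: Set[int]
--
--     for node in nodes:
--         stack = [node]
--         while stack:
--             n = stack.pop()
--             if n in seen_nodes:
--                 continue
--             seen_nodes.add(n)
--             children = dag[n]
--             if children:
--                 # reversed so children are popped in their original order,
--                 # giving the same DFS order as the recursive version
--                 stack.extend(reversed(children))
--             else:
--                 shadow.add(n)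
--     return shadow
-- ===== Notes on version B (the rewrite author's own statement) =====
-- stated objective: alternative
-- what changed: The recursive helper add_to_shadow is replaced by an iterative depth-first traversal with an explicit stack per start node (children pushed reversed so the visit order is identical), removing recursion entirely.
import Mathlib
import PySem

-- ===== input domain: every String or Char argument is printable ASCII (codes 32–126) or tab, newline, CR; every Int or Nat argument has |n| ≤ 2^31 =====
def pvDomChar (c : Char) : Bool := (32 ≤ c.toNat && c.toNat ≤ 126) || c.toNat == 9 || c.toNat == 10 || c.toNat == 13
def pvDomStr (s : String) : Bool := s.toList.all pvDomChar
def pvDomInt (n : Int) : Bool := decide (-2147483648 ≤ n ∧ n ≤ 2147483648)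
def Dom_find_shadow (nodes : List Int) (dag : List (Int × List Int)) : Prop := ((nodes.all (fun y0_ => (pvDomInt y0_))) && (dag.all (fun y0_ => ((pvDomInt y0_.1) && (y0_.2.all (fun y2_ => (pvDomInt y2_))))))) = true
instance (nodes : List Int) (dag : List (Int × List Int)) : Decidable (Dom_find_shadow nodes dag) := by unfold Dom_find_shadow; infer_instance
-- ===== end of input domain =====

-- B replaces A's recursive helper by an explicit-stack iterative DFS with the same visit order.

-- number of dag keys not yet in `seen`: termination measure for B's loop and fuel bound for A's port
def shU (dag : List (Int × List Int)) (seen : PySem.Set Int) : Nat :=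
  (dag.map Prod.fst).countP (fun k => !(PySem.Set.contains seen k))

-- dag[x] : the Python dict lookup (first match on the association list)
def shGet? (dag : List (Int × List Int)) (x : Int) : Option (List Int) :=
  (PySem.Dict.mk dag).get? x

theorem contains_add_iff (seen : PySem.Set Int) (n x : Int) :
    (PySem.Set.add seen n).contains x = true ↔ (x ∈ seen ∨ x = n) := by
  rw [PySem.Set.contains_iff, PySem.Set.mem_add]

theorem shU_add_eq_of_not_key (dag : List (Int × List Int)) (seen : PySem.Set Int) (n : Int)
    (h : n ∉ dag.map Prod.fst) : shU dag (PySem.Set.add seen n) = shU dag seen := by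
  apply List.countP_congr
  intro x hx
  have hxn : x ≠ n := by rintro rfl; exact h hx
  have hco : (PySem.Set.add seen n).contains x = seen.contains x := by
    by_cases hm : x ∈ seen
    · simp [hm]
    · simp [hm, hxn]
  rw [hco]

theorem shU_add_lt (dag : List (Int × List Int)) (seen : PySem.Set Int) (n : Int)
    (hk : n ∈ dag.map Prod.fst) (hs : ¬ seen.contains n = true) :
    shU dag (PySem.Set.add seen n) < shU dag seen := by
  unfold shU
  rw [List.countP_eq_length_filter, List.countP_eq_length_filter]
  have hsub : List.Sublist ((dag.map Prod.fst).filter (fun k => !(PySem.Set.contains (PySem.Set.add seen n) k)))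
      ((dag.map Prod.fst).filter (fun k => !(PySem.Set.contains seen k))) := by
    apply List.monotone_filter_right
    intro x hx
    simp only [Bool.not_eq_true'] at hx ⊢
    rw [Bool.eq_false_iff] at hx ⊢
    intro hc
    exact hx ((contains_add_iff seen n x).2 (Or.inl ((PySem.Set.contains_iff _ _).1 hc)))
  refine Nat.lt_of_le_of_ne hsub.length_le ?_
  intro heq
  have heql := hsub.eq_of_length heq
  have hmem : n ∈ (dag.map Prod.fst).filter (fun k => !(PySem.Set.contains seen k)) := by
    rw [List.mem_filter]
    refine ⟨hk, ?_⟩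
    simp only [Bool.not_eq_true']
    exact Bool.eq_false_iff.2 hs
  rw [← heql, List.mem_filter] at hmem
  have hcn : (PySem.Set.add seen n).contains n = true := (contains_add_iff seen n n).2 (Or.inr rfl)
  simp at hmem

theorem shGet?_none_not_key (dag : List (Int × List Int)) (x : Int)
    (h : shGet? dag x = none) : x ∉ dag.map Prod.fst := by
  simp only [shGet?, PySem.Dict.get?, Option.map_eq_none_iff, List.find?_eq_none] at h
  simp only [List.mem_map]
  rintro ⟨⟨a, b⟩, hm, rfl⟩
  exact absurd (by simp : ((a, b).1 == a) = true) (h _ hm)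

theorem shGet?_some_key (dag : List (Int × List Int)) (x : Int) (cs : List Int)
    (h : shGet? dag x = some cs) : x ∈ dag.map Prod.fst := by
  simp only [shGet?, PySem.Dict.get?, Option.map_eq_some_iff] at h
  obtain ⟨pr, hf, _⟩ := h
  have hm := List.mem_of_find?_eq_some hf
  have he := List.find?_some hf
  rw [beq_iff_eq] at he
  exact he ▸ List.mem_map_of_mem hm

-- ===== PORT A =====
-- Python A's `add_to_shadow` recurses while the mutable `seen_nodes` set grows; the Lean
-- port carries a fuel parameter consumed only when descending into the children of a
-- fresh key, and `find_shadow` supplies fuel = number of dag keys, proved sufficient in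
-- the lemmas below (the fuel-0 branch is never reached then).  State = (seen_nodes, shadow).
def addToShadow (dag : List (Int × List Int)) :
    Nat → Int → PySem.Set Int × PySem.Set Int → PySem.Set Int × PySem.Set Int
  | fuel, node, st =>
    if PySem.Set.contains st.1 node then st                -- if node_id in seen_nodes: return
    else
      let st1 := (PySem.Set.add st.1 node, st.2)           -- seen_nodes.add(node_id)
      match shGet? dag node with                           -- children_ids = dag[node_id]
      | none => st1                                        -- Python raises KeyError; outside Pre_
      | some [] => (st1.1, PySem.Set.add st1.2 node)       -- shadow.add(node_id)
      | some (c :: cs) =>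
        match fuel with
        | 0 => st1                                         -- unreachable for fuel ≥ shU (proved below)
        | fuel' + 1 =>
          (c :: cs).foldl (fun s child => addToShadow dag fuel' child s) st1  -- for child in children_ids: add_to_shadow(child)
  termination_by fuel _ _ => fuel

def find_shadow (nodes : List Int) (dag : List (Int × List Int)) : List Int :=
  (nodes.foldl (fun st node => addToShadow dag (shU dag PySem.Set.empty) node st)   -- for node in nodes: add_to_shadow(node)
      ((PySem.Set.empty : PySem.Set Int), (PySem.Set.empty : PySem.Set Int))).2     -- return shadow

-- ===== PORT B =====
-- Iterative DFS: the Lean stack list's HEAD is the Python list's LAST element (the top),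
-- so `stack.pop()` is a head match and `stack.extend(reversed(children))` is `children ++ stack`.
def shadowLoop (dag : List (Int × List Int)) :
    List Int → PySem.Set Int × PySem.Set Int → PySem.Set Int × PySem.Set Int
  | [], st => st                                           -- while stack: … exits
  | n :: stack, st =>                                      -- n = stack.pop()
    if PySem.Set.contains st.1 n then shadowLoop dag stack st   -- if n in seen_nodes: continue
    else
      let st1 := (PySem.Set.add st.1 n, st.2)              -- seen_nodes.add(n)
      match hg : shGet? dag n with                         -- children = dag[n]
      | none => shadowLoop dag stack st1                   -- Python raises KeyError; outside Pre_
      | some [] => shadowLoop dag stack (st1.1, PySem.Set.add st1.2 n)   -- shadow.add(n)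
      | some (c :: cs) => shadowLoop dag ((c :: cs) ++ stack) st1        -- stack.extend(reversed(children))
  termination_by stack st => (shU dag st.1, stack.length)
  decreasing_by
  · exact Prod.Lex.right _ (Nat.lt_succ_self _)
  · rcases Nat.lt_or_ge (shU dag (PySem.Set.add st.1 n)) (shU dag st.1) with hlt | _
    · exact Prod.Lex.left _ _ hlt
    · rw [shU_add_eq_of_not_key dag st.1 n (shGet?_none_not_key dag n hg)]
      exact Prod.Lex.right _ (Nat.lt_succ_self _)
  · exact Prod.Lex.left _ _ (shU_add_lt dag st.1 n (shGet?_some_key dag n _ hg) (by assumption))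
  · exact Prod.Lex.left _ _ (shU_add_lt dag st.1 n (shGet?_some_key dag n _ hg) (by assumption))

def find_shadow_alt (nodes : List Int) (dag : List (Int × List Int)) : List Int :=
  (nodes.foldl (fun st node => shadowLoop dag [node] st)   -- for node in nodes: stack = [node]; while stack: …
      ((PySem.Set.empty : PySem.Set Int), (PySem.Set.empty : PySem.Set Int))).2     -- return shadow

-- ===== PRECONDITION & SPEC =====
-- Pre_ excludes exactly the inputs on which A (and B) raise KeyError: some id reachable
-- from `nodes` along the child relation is not a key of dag.  The reachable set is the
-- monotone closure of `nodes` under "add the children of every member"; it stabilises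
-- after at most |dag| rounds (a shortest path repeats no key), so |dag|+1 rounds compute it.
def shClosure (dag : List (Int × List Int)) (nodes : List Int) : PySem.Set Int :=
  (fun s => PySem.Set.update s (s.foldl (fun acc x => acc ++ ((shGet? dag x).getD [])) []))^[dag.length + 1]
    (PySem.Set.ofList nodes)

def Pre_find_shadow (nodes : List Int) (dag : List (Int × List Int)) : Prop :=
  ∀ x ∈ shClosure dag nodes, x ∈ dag.map Prod.fst
instance (nodes : List Int) (dag : List (Int × List Int)) : Decidable (Pre_find_shadow nodes dag) := by unfold Pre_find_shadow; infer_instance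

def pvWitness_find_shadow : List Int × (List (Int × List Int)) :=
  ([1, 3], [(1, [2, 3]), (2, []), (3, [2])])

def Spec_find_shadow (nodes : List Int) (dag : List (Int × List Int)) (out : List Int) : Prop := out = find_shadow_alt nodes dag
instance (nodes : List Int) (dag : List (Int × List Int)) (out : List Int) : Decidable (Spec_find_shadow nodes dag out) := by unfold Spec_find_shadow; infer_instance

-- ===== CLAIM (what is proved, stated in full; the proofs are below) =====
def Claim_equal_find_shadow : Prop := ∀ (nodes : List Int) (dag : List (Int × List Int)), Dom_find_shadow nodes dag → Pre_find_shadow nodes dag → Spec_find_shadow nodes dag (find_shadow nodes dag)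

-- ===== LEMMAS AND PROOFS =====

theorem shU_add_le (dag : List (Int × List Int)) (seen : PySem.Set Int) (n : Int) :
    shU dag (PySem.Set.add seen n) ≤ shU dag seen := by
  apply List.countP_mono_left
  intro x _ hx
  simp only [Bool.not_eq_true'] at hx ⊢
  rw [Bool.eq_false_iff] at hx ⊢
  intro hc
  exact hx ((contains_add_iff seen n x).2 (Or.inl ((PySem.Set.contains_iff _ _).1 hc)))

theorem shU_pos (dag : List (Int × List Int)) (seen : PySem.Set Int) (n : Int)
    (hk : n ∈ dag.map Prod.fst) (hs : ¬ seen.contains n = true) :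
    0 < shU dag seen := by
  unfold shU
  rw [List.countP_pos_iff]
  refine ⟨n, hk, ?_⟩
  simp only [Bool.not_eq_true']
  exact Bool.eq_false_iff.2 hs

-- branch equations of the two ports
theorem addToShadow_seen (dag : List (Int × List Int)) (fuel : Nat) (n : Int)
    (st : PySem.Set Int × PySem.Set Int) (h : st.1.contains n = true) :
    addToShadow dag fuel n st = st := by
  rw [addToShadow, if_pos h]

theorem addToShadow_none (dag : List (Int × List Int)) (fuel : Nat) (n : Int)
    (st : PySem.Set Int × PySem.Set Int) (hs : ¬ st.1.contains n = true)
    (hg : shGet? dag n = none) :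
    addToShadow dag fuel n st = (PySem.Set.add st.1 n, st.2) := by
  rw [addToShadow, if_neg hs, hg]

theorem addToShadow_leaf (dag : List (Int × List Int)) (fuel : Nat) (n : Int)
    (st : PySem.Set Int × PySem.Set Int) (hs : ¬ st.1.contains n = true)
    (hg : shGet? dag n = some []) :
    addToShadow dag fuel n st = (PySem.Set.add st.1 n, PySem.Set.add st.2 n) := by
  rw [addToShadow, if_neg hs, hg]

theorem addToShadow_children (dag : List (Int × List Int)) (fuel' : Nat) (n c : Int) (cs : List Int)
    (st : PySem.Set Int × PySem.Set Int) (hs : ¬ st.1.contains n = true)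
    (hg : shGet? dag n = some (c :: cs)) :
    addToShadow dag (fuel' + 1) n st
      = (c :: cs).foldl (fun s child => addToShadow dag fuel' child s) (PySem.Set.add st.1 n, st.2) := by
  rw [addToShadow, if_neg hs, hg]

theorem shadowLoop_nil (dag : List (Int × List Int)) (st : PySem.Set Int × PySem.Set Int) :
    shadowLoop dag [] st = st := by
  rw [shadowLoop]

theorem shadowLoop_seen (dag : List (Int × List Int)) (n : Int) (stack : List Int)
    (st : PySem.Set Int × PySem.Set Int) (h : st.1.contains n = true) :
    shadowLoop dag (n :: stack) st = shadowLoop dag stack st := by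
  rw [shadowLoop, if_pos h]

theorem shadowLoop_none (dag : List (Int × List Int)) (n : Int) (stack : List Int)
    (st : PySem.Set Int × PySem.Set Int) (hs : ¬ st.1.contains n = true)
    (hg : shGet? dag n = none) :
    shadowLoop dag (n :: stack) st = shadowLoop dag stack (PySem.Set.add st.1 n, st.2) := by
  rw [shadowLoop, if_neg hs]
  split <;> rename_i heq <;> simp_all

theorem shadowLoop_leaf (dag : List (Int × List Int)) (n : Int) (stack : List Int)
    (st : PySem.Set Int × PySem.Set Int) (hs : ¬ st.1.contains n = true)
    (hg : shGet? dag n = some []) :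
    shadowLoop dag (n :: stack) st
      = shadowLoop dag stack (PySem.Set.add st.1 n, PySem.Set.add st.2 n) := by
  rw [shadowLoop, if_neg hs]
  split <;> rename_i heq <;> simp_all

theorem shadowLoop_children (dag : List (Int × List Int)) (n c : Int) (cs stack : List Int)
    (st : PySem.Set Int × PySem.Set Int) (hs : ¬ st.1.contains n = true)
    (hg : shGet? dag n = some (c :: cs)) :
    shadowLoop dag (n :: stack) st
      = shadowLoop dag ((c :: cs) ++ stack) (PySem.Set.add st.1 n, st.2) := by
  rw [shadowLoop, if_neg hs]
  split <;> rename_i heq <;> simp_all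

-- `seen` never shrinks, so the unseen-key count is monotone along any call of A's helper
theorem addToShadow_shU_le (dag : List (Int × List Int)) :
    ∀ (fuel : Nat) (node : Int) (st : PySem.Set Int × PySem.Set Int),
      shU dag (addToShadow dag fuel node st).1 ≤ shU dag st.1 := by
  intro fuel
  induction fuel using Nat.strong_induction_on with
  | _ fuel ih =>
    intro node st
    by_cases hs : st.1.contains node = true
    · rw [addToShadow_seen dag fuel node st hs]
    · match hg : shGet? dag node with
      | none => rw [addToShadow_none dag fuel node st hs hg]; exact shU_add_le dag st.1 node
      | some [] => rw [addToShadow_leaf dag fuel node st hs hg]; exact shU_add_le dag st.1 node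
      | some (c :: cs) =>
        match fuel with
        | 0 => rw [addToShadow, if_neg hs, hg]; exact shU_add_le dag st.1 node
        | fuel' + 1 =>
          rw [addToShadow_children dag fuel' node c cs st hs hg]
          have hfold : ∀ (l : List Int) (s : PySem.Set Int × PySem.Set Int),
              shU dag ((l.foldl (fun s child => addToShadow dag fuel' child s) s)).1 ≤ shU dag s.1 := by
            intro l
            induction l with
            | nil => intro s; exact le_refl _
            | cons x xs ihl =>
              intro s
              exact le_trans (ihl _) (ih fuel' (Nat.lt_succ_self _) x s)
          exact le_trans (hfold _ _) (shU_add_le dag st.1 node)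

-- fuel irrelevance: any fuel ≥ the unseen-key count computes the same result
theorem addToShadow_fuel_irrel (dag : List (Int × List Int)) :
    ∀ (k1 k2 : Nat) (node : Int) (st : PySem.Set Int × PySem.Set Int),
      shU dag st.1 ≤ k1 → shU dag st.1 ≤ k2 →
      addToShadow dag k1 node st = addToShadow dag k2 node st := by
  intro k1
  induction k1 using Nat.strong_induction_on with
  | _ k1 ih =>
    intro k2 node st h1 h2
    by_cases hs : st.1.contains node = true
    · rw [addToShadow_seen dag k1 node st hs, addToShadow_seen dag k2 node st hs]
    · match hg : shGet? dag node with
      | none => rw [addToShadow_none dag k1 node st hs hg, addToShadow_none dag k2 node st hs hg]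
      | some [] => rw [addToShadow_leaf dag k1 node st hs hg, addToShadow_leaf dag k2 node st hs hg]
      | some (c :: cs) =>
        have hkey := shGet?_some_key dag node _ hg
        have hpos := shU_pos dag st.1 node hkey hs
        have hlt := shU_add_lt dag st.1 node hkey hs
        obtain ⟨a, rfl⟩ : ∃ a, k1 = a + 1 := ⟨k1 - 1, by omega⟩
        obtain ⟨b, rfl⟩ : ∃ b, k2 = b + 1 := ⟨k2 - 1, by omega⟩
        rw [addToShadow_children dag a node c cs st hs hg,
            addToShadow_children dag b node c cs st hs hg]
        have hfold : ∀ (l : List Int) (s : PySem.Set Int × PySem.Set Int),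
            shU dag s.1 ≤ a → shU dag s.1 ≤ b →
            l.foldl (fun s child => addToShadow dag a child s) s
              = l.foldl (fun s child => addToShadow dag b child s) s := by
          intro l
          induction l with
          | nil => intro s _ _; rfl
          | cons x xs ihl =>
            intro s hsa hsb
            simp only [List.foldl_cons]
            rw [ih a (Nat.lt_succ_self _) b x s hsa hsb]
            have hle := addToShadow_shU_le dag b x s
            exact ihl _ (by omega) (by omega)
        exact hfold (c :: cs) _ (by show shU dag (PySem.Set.add st.1 node) ≤ a; omega) (by show shU dag (PySem.Set.add st.1 node) ≤ b; omega)

-- B's stack machine runs A's recursion, one stack entry at a time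
theorem shadowLoop_eq_foldl (dag : List (Int × List Int)) :
    ∀ (stack : List Int) (st : PySem.Set Int × PySem.Set Int) (k : Nat),
      shU dag st.1 ≤ k →
      shadowLoop dag stack st = stack.foldl (fun s n => addToShadow dag k n s) st := by
  intro stack st
  induction stack, st using shadowLoop.induct dag with
  | case1 st =>
    intro k _
    rw [shadowLoop_nil]
    rfl
  | case2 n stack st hseen ihp =>
    intro k hk
    rw [shadowLoop_seen dag n stack st hseen, ihp k hk, List.foldl_cons,
        addToShadow_seen dag k n st hseen]
  | case3 n stack st hseen st1 hget ihp =>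
    intro k hk
    have ihp' : ∀ (k : Nat), shU dag (PySem.Set.add st.1 n, st.2).1 ≤ k →
        shadowLoop dag stack (PySem.Set.add st.1 n, st.2)
          = List.foldl (fun s n => addToShadow dag k n s) (PySem.Set.add st.1 n, st.2) stack := ihp
    rw [shadowLoop_none dag n stack st hseen hget,
        ihp' k (le_trans (shU_add_le dag st.1 n) hk), List.foldl_cons,
        addToShadow_none dag k n st hseen hget]
  | case4 n stack st hseen st1 hget ihp =>
    intro k hk
    have ihp' : ∀ (k : Nat), shU dag (PySem.Set.add st.1 n, PySem.Set.add st.2 n).1 ≤ k →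
        shadowLoop dag stack (PySem.Set.add st.1 n, PySem.Set.add st.2 n)
          = List.foldl (fun s n => addToShadow dag k n s) (PySem.Set.add st.1 n, PySem.Set.add st.2 n) stack := ihp
    rw [shadowLoop_leaf dag n stack st hseen hget,
        ihp' k (le_trans (shU_add_le dag st.1 n) hk), List.foldl_cons,
        addToShadow_leaf dag k n st hseen hget]
  | case5 n stack st hseen st1 c cs hget ihp =>
    intro k hk
    have ihp' : ∀ (k : Nat), shU dag (PySem.Set.add st.1 n, st.2).1 ≤ k →
        shadowLoop dag ((c :: cs) ++ stack) (PySem.Set.add st.1 n, st.2)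
          = List.foldl (fun s n => addToShadow dag k n s) (PySem.Set.add st.1 n, st.2) ((c :: cs) ++ stack) := ihp
    have hkey := shGet?_some_key dag n _ hget
    have hpos := shU_pos dag st.1 n hkey hseen
    have hlt := shU_add_lt dag st.1 n hkey hseen
    obtain ⟨k', rfl⟩ : ∃ k', k = k' + 1 := ⟨k - 1, by omega⟩
    rw [shadowLoop_children dag n c cs stack st hseen hget,
        ihp' (k' + 1) (by show shU dag (PySem.Set.add st.1 n) ≤ k' + 1; omega)]
    conv_rhs => rw [List.foldl_cons, addToShadow_children dag k' n c cs st hseen hget]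
    rw [List.foldl_append]
    congr 1
    have hsame : ∀ (l : List Int) (s : PySem.Set Int × PySem.Set Int), shU dag s.1 ≤ k' →
        l.foldl (fun s n => addToShadow dag (k' + 1) n s) s
          = l.foldl (fun s child => addToShadow dag k' child s) s := by
      intro l
      induction l with
      | nil => intro s _; rfl
      | cons x xs ihl =>
        intro s hsk
        simp only [List.foldl_cons]
        rw [addToShadow_fuel_irrel dag (k' + 1) k' x s (by omega) hsk]
        have hle := addToShadow_shU_le dag k' x s
        exact ihl _ (by omega)
    exact hsame (c :: cs) _ (by show shU dag (PySem.Set.add st.1 n) ≤ k'; omega)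

-- ===== VERDICT (by name: the statement is the Claim_ definition above) =====
theorem find_shadow_spec : Claim_equal_find_shadow := by
  intro nodes dag _ _
  unfold Spec_find_shadow find_shadow find_shadow_alt
  have hmain : ∀ (ns : List Int) (st : PySem.Set Int × PySem.Set Int),
      shU dag st.1 ≤ shU dag PySem.Set.empty →
      ns.foldl (fun st node => addToShadow dag (shU dag PySem.Set.empty) node st) st
        = ns.foldl (fun st node => shadowLoop dag [node] st) st := by
    intro ns
    induction ns with
    | nil => intro st _; rfl
    | cons x xs ih =>
      intro st hst
      simp only [List.foldl_cons]
      rw [shadowLoop_eq_foldl dag [x] st (shU dag PySem.Set.empty) hst]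
      simp only [List.foldl_cons, List.foldl_nil]
      have hle := addToShadow_shU_le dag (shU dag PySem.Set.empty) x st
      exact ih _ (by omega)
  exact congrArg Prod.snd (hmain nodes _ (le_of_eq rfl))
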